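-- pv_equiv track=rewrite | github.com/Zheng-Yi-git/Akuna | max_distinct.py | get_max_distinct
-- ===== SOURCE A (Python) =====
-- def get_max_distinct(a, b, k):
--     n = len(a)
--     duplicates_in_a = 0
--     unique_in_b = 0
--     s = set()
--     s2 = set()
--     for num in a:
--         if num in s:
--             duplicates_in_a += 1
--         else:
--             s.add(num)
--     for num in b:
--         if num not in s and num not in s2:
--             unique_in_b += 1
--             s2.add(num)
--     return n - duplicates_in_a + min(duplicates_in_a, unique_in_b, k)
-- ===== SOURCE B (Python) =====
-- def get_max_distinct(a, b, k):
--     sa = sorted(a)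
--     dup = sum(1 for x, y in zip(sa, sa[1:]) if x == y)
--     in_a = set(a)
--     sb = sorted(b)
--     ub = sum(1 for x, y in zip(sb, sb[1:]) if x != y and x not in in_a)
--     if sb and sb[-1] not in in_a:
--         ub += 1
--     return len(a) - dup + min(dup, ub, k)
-- ===== Notes on version B (the rewrite author's own statement) =====
-- stated objective: alternative
-- what changed: Replaces A's incremental per-element counting passes (running counters over sets grown element by element) with a sorting algorithm: duplicates in a are counted as adjacent equal pairs of sorted(a), and new distinct elements of b as last-occurrence positions of sorted(b) (adjacent-differ or final element) not present in a.
import Mathlib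
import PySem

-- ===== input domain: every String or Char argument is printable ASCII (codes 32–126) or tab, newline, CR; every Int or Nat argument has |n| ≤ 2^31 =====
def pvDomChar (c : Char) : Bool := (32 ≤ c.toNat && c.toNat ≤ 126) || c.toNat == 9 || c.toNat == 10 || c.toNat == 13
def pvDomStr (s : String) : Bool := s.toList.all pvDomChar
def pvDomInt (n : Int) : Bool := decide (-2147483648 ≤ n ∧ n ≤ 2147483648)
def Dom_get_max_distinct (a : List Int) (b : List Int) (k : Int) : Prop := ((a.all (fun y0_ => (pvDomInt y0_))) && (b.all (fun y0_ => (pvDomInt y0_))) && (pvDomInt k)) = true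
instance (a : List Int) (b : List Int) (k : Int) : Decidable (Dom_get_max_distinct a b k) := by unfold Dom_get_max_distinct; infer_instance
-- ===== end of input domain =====

-- B replaces A's hash-set counting passes by a sorting algorithm: duplicates are
-- adjacent equal pairs of sorted(a); new distinct b-elements are last occurrences
-- in sorted(b) not present in a (objective: alternative).

-- ===== PORT A =====
-- first loop of A: counts duplicates while growing s
def pvLoopA (st : Int × PySem.Set Int) (num : Int) : Int × PySem.Set Int :=
  if PySem.Set.contains st.2 num then (st.1 + 1, st.2) else (st.1, PySem.Set.add st.2 num)

-- second loop of A: counts elements of b seen in neither s nor s2, growing s2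
def pvLoopB (s : PySem.Set Int) (st : Int × PySem.Set Int) (num : Int) : Int × PySem.Set Int :=
  if !PySem.Set.contains s num && !PySem.Set.contains st.2 num
  then (st.1 + 1, PySem.Set.add st.2 num) else st

def get_max_distinct (a : List Int) (b : List Int) (k : Int) : Int :=
  let n : Int := a.length
  let p := a.foldl pvLoopA (0, PySem.Set.empty)
  let duplicates_in_a := p.1
  let s := p.2
  let q := b.foldl (pvLoopB s) (0, PySem.Set.empty)
  let unique_in_b := q.1
  n - duplicates_in_a + min duplicates_in_a (min unique_in_b k)

-- ===== PORT B =====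
def get_max_distinct_alt (a : List Int) (b : List Int) (k : Int) : Int :=
  let sa := PySem.List.sorted a (fun x => x) false
  -- sum(1 for x, y in zip(sa, sa[1:]) if x == y)
  let dup : Int := ((sa.zip sa.tail).countP (fun p => p.1 == p.2) : Int)
  let in_a := PySem.Set.ofList a
  let sb := PySem.List.sorted b (fun x => x) false
  -- sum(1 for x, y in zip(sb, sb[1:]) if x != y and x not in in_a)
  let ub0 : Int := ((sb.zip sb.tail).countP
    (fun p => p.1 != p.2 && !PySem.Set.contains in_a p.1) : Int)
  -- if sb and sb[-1] not in in_a: ub += 1   (sb[-1] via getLast?)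
  let ub : Int :=
    match sb.getLast? with
    | some x => if !PySem.Set.contains in_a x then ub0 + 1 else ub0
    | none => ub0
  (a.length : Int) - dup + min dup (min ub k)

-- ===== PRECONDITION & SPEC =====
def Spec_get_max_distinct (a : List Int) (b : List Int) (k : Int) (out : Int) : Prop := out = get_max_distinct_alt a b k
instance (a : List Int) (b : List Int) (k : Int) (out : Int) : Decidable (Spec_get_max_distinct a b k out) := by unfold Spec_get_max_distinct; infer_instance

-- ===== CLAIM (what is proved, stated in full; the proofs are below) =====
def Claim_equal_get_max_distinct : Prop := ∀ (a : List Int) (b : List Int) (k : Int), Dom_get_max_distinct a b k → Spec_get_max_distinct a b k (get_max_distinct a b k)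

-- ===== LEMMAS AND PROOFS =====

-- A's first loop: the counter equals (#processed) + |s₀| - |s'|, and s' = s₀.update(l)
lemma loopA_eq (l : List Int) (d : Int) (s : PySem.Set Int) :
    l.foldl pvLoopA (d, s) =
      (d + l.length + s.length - (PySem.Set.update s l).length, PySem.Set.update s l) := by
  induction l generalizing d s with
  | nil => simp [PySem.Set.update]
  | cons x l ih =>
    simp only [List.foldl_cons, PySem.Set.update_cons, pvLoopA]
    by_cases hx : x ∈ s
    · simp [hx, ih]
      omega
    · simp [hx, ih]
      omega

-- A's second loop over l with ambient set s: the counter counts the new elements not in s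
lemma loopB_eq (s : PySem.Set Int) (l : List Int) (u : Int) (s2 : PySem.Set Int) :
    l.foldl (pvLoopB s) (u, s2) =
      (u + (PySem.Set.update s2 (l.filter (fun x => !PySem.Set.contains s x))).length
         - s2.length,
       PySem.Set.update s2 (l.filter (fun x => !PySem.Set.contains s x))) := by
  induction l generalizing u s2 with
  | nil => simp [PySem.Set.update]
  | cons x l ih =>
    simp only [List.foldl_cons, pvLoopB, List.filter_cons]
    by_cases hs : x ∈ s
    · simp [hs, ih]
    · by_cases h2 : x ∈ s2
      · simp [hs, h2, ih, PySem.Set.update_cons]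
      · simp [hs, h2, ih, PySem.Set.update_cons]
        omega

-- in a ≤-sorted list, the head is not repeated in the tail unless equal to the next element
lemma head_not_mem_of_ne (x y : Int) (t : List Int)
    (h : (x :: y :: t).Pairwise (· ≤ ·)) (hxy : x ≠ y) : x ∉ y :: t := by
  rcases List.pairwise_cons.mp h with ⟨hx, ht⟩
  rcases List.pairwise_cons.mp ht with ⟨hy, _⟩
  intro hmem
  rcases List.mem_cons.mp hmem with rfl | hmem
  · exact hxy rfl
  · have h1 : x ≤ y := hx y (List.mem_cons_self)
    have h2 : y ≤ x := hy x hmem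
    exact hxy (le_antisymm h1 h2)

-- adjacent equal pairs of a sorted list count the non-distinct surplus
lemma adjEq_count (l : List Int) (h : l.Pairwise (· ≤ ·)) :
    l.toFinset.card + (l.zip l.tail).countP (fun p => p.1 == p.2) = l.length := by
  induction l with
  | nil => simp
  | cons x t ih =>
    cases t with
    | nil => simp
    | cons y t' =>
      have htail : (y :: t').Pairwise (· ≤ ·) := (List.pairwise_cons.mp h).2
      have hz : (x :: y :: t').zip (x :: y :: t').tail
          = (x, y) :: ((y :: t').zip (y :: t').tail) := by
        simp [List.zip_cons_cons]
      have hrec := ih htail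
      rw [hz, List.countP_cons]
      by_cases hxy : x = y
      · subst hxy
        simp only [List.toFinset_cons, Finset.insert_idem, List.length_cons] at hrec ⊢
        simp only [beq_self_eq_true, if_pos]
        omega
      · have hnm : x ∉ y :: t' := head_not_mem_of_ne x y t' h hxy
        have hb : ((x, y).1 == (x, y).2) = false := by simpa using hxy
        rw [hb]
        simp only [List.toFinset_cons, List.length_cons] at hrec ⊢
        rw [Finset.card_insert_of_notMem (by simpa using hnm)]
        simp only [if_neg Bool.false_ne_true]
        omega

-- last occurrences (adjacent-differ or final element) of a sorted list satisfying q
-- count the distinct elements satisfying q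
lemma adjLast_count (q : Int → Bool) (l : List Int) (h : l.Pairwise (· ≤ ·)) :
    (l.zip l.tail).countP (fun p => p.1 != p.2 && q p.1)
      + (match l.getLast? with
         | some x => if q x then 1 else 0
         | none => 0)
      = (l.toFinset.filter (fun x => q x)).card := by
  induction l with
  | nil => simp
  | cons x t ih =>
    cases t with
    | nil =>
      simp [Finset.filter_singleton]
      by_cases hq : q x <;> simp [hq]
    | cons y t' =>
      have htail : (y :: t').Pairwise (· ≤ ·) := (List.pairwise_cons.mp h).2
      have hz : (x :: y :: t').zip (x :: y :: t').tail
          = (x, y) :: ((y :: t').zip (y :: t').tail) := by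
        simp [List.zip_cons_cons]
      have hlast : (x :: y :: t').getLast? = (y :: t').getLast? := by
        simp [List.getLast?_cons_cons]
      have hrec := ih htail
      rw [hz, List.countP_cons, hlast]
      by_cases hxy : x = y
      · subst hxy
        simp only [List.toFinset_cons, Finset.insert_idem] at hrec ⊢
        simp only [bne_self_eq_false, Bool.false_and, if_neg Bool.false_ne_true]
        omega
      · have hnm : x ∉ y :: t' := head_not_mem_of_ne x y t' h hxy
        have hb : ((x, y).1 != (x, y).2 && q (x, y).1) = q x := by
          simp [bne, hxy]
        rw [hb]
        simp only [List.toFinset_cons] at hrec ⊢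
        rw [Finset.filter_insert]
        by_cases hq : q x
        · simp only [hq, if_pos]
          rw [Finset.card_insert_of_notMem (by
            simp only [Finset.mem_filter]
            rintro ⟨hmem, -⟩
            exact hnm (by simpa using hmem))]
          omega
        · simp only [hq, Bool.false_eq_true, if_false]
          omega

-- a nodup list with the same members as l has l.toFinset.card elements
lemma len_eq_card (s l : List Int) (hnd : s.Nodup) (hm : ∀ x, x ∈ s ↔ x ∈ l) :
    s.length = l.toFinset.card := by
  rw [← List.toFinset_card_of_nodup hnd]
  congr 1
  ext x
  simp [hm x]

-- ===== VERDICT (by name: the statement is the Claim_ definition above) =====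
theorem get_max_distinct_spec : Claim_equal_get_max_distinct := by
  intro a b k _
  unfold Spec_get_max_distinct get_max_distinct get_max_distinct_alt
  simp only [loopA_eq, loopB_eq, PySem.Set.update_empty]
  have hsa_perm : (PySem.List.sorted a (fun x => x) false).Perm a :=
    PySem.List.sorted_perm a (fun x => x) false
  have hsa_pw : (PySem.List.sorted a (fun x => x) false).Pairwise (· ≤ ·) := by
    simpa using PySem.List.sorted_pairwise (xs := a) (key := fun x => x)
  have hdupA : (PySem.Set.ofList a).length = a.toFinset.card :=
    len_eq_card _ a (PySem.Set.nodup_ofList a) (fun x => by simp [PySem.Set.mem_ofList])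
  have hdupB := adjEq_count _ hsa_pw
  rw [List.toFinset_eq_of_perm _ _ hsa_perm, hsa_perm.length_eq] at hdupB
  have hsb_perm : (PySem.List.sorted b (fun x => x) false).Perm b :=
    PySem.List.sorted_perm b (fun x => x) false
  have hsb_pw : (PySem.List.sorted b (fun x => x) false).Pairwise (· ≤ ·) := by
    simpa using PySem.List.sorted_pairwise (xs := b) (key := fun x => x)
  have hubB := adjLast_count (fun x => !PySem.Set.contains (PySem.Set.ofList a) x) _ hsb_pw
  rw [List.toFinset_eq_of_perm _ _ hsb_perm] at hubB
  have hubA : (PySem.Set.ofList (b.filter (fun x => !PySem.Set.contains (PySem.Set.ofList a) x))).length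
      = (b.toFinset.filter (fun x => !PySem.Set.contains (PySem.Set.ofList a) x)).card := by
    rw [len_eq_card _ (b.filter (fun x => !PySem.Set.contains (PySem.Set.ofList a) x))
      (PySem.Set.nodup_ofList _)
      (fun x => by simp [PySem.Set.mem_ofList, List.mem_filter])]
    rw [List.toFinset_filter]
  have hlenE : (PySem.Set.empty : PySem.Set Int).length = 0 := rfl
  rw [hlenE]
  cases hL : (PySem.List.sorted b (fun x => x) false).getLast? with
  | none =>
    simp only [hL] at hubB ⊢
    push_cast
    omega
  | some x =>
    simp only [hL] at hubB ⊢
    by_cases hc : PySem.Set.contains (PySem.Set.ofList a) x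
    · simp only [hc, Bool.not_true, Bool.false_eq_true, if_false] at hubB ⊢
      push_cast
      omega
    · simp only [hc, Bool.not_false, if_pos] at hubB ⊢
      push_cast
      omega
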